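-- pv_equiv track=rewrite | github.com/wuuthradd/EDMC-SpanshRouter | SpanshTools/route_viewer.py | _sample_viewer_rows_for_widths
-- ===== SOURCE A (Python) =====
-- def _sample_viewer_rows_for_widths(rows):
--     total = len(rows)
--     if total <= 220:
--         return rows
--     sample_indices = set(range(min(120, total)))
--     sample_indices.update(range(max(0, total - 40), total))
--     step = max(1, total // 80)
--     sample_indices.update(range(0, total, step))
--     return [rows[index] for index in sorted(sample_indices)]
-- ===== SOURCE B (Python) =====
-- def _sample_viewer_rows_for_widths(rows):
--     total = len(rows)
--     if total <= 220:
--         return rows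
--     step = max(1, total // 80)
--     first = (119 // step + 1) * step  # least multiple of step that is >= 120
--     middle = [rows[i] for i in range(first, total - 40, step)]
--     return rows[:120] + middle + rows[total - 40:]
-- ===== Notes on version B (the rewrite author's own statement) =====
-- stated objective: simpler
-- what changed: Instead of unioning three index ranges into a set and sorting it, B builds the result directly as the concatenation of three segments: the head slice rows[:120], a stepped middle starting at the first multiple of step >= 120 (so no deduplication is ever needed), and the tail slice rows[total-40:].
import Mathlib
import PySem

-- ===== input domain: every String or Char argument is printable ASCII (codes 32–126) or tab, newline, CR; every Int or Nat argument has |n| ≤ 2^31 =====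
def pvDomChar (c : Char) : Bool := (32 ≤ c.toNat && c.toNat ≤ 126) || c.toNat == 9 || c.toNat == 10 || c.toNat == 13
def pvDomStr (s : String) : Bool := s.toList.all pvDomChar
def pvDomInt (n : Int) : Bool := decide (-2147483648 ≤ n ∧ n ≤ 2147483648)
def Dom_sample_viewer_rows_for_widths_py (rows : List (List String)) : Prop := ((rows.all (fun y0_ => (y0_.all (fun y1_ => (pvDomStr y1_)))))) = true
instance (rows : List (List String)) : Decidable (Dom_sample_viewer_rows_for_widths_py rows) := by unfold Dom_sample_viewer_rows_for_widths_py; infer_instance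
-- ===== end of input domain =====

-- B replaces A's union-of-three-ranges set + sort by direct concatenation of three segments (head slice, stepped middle starting at the first multiple of step ≥ 120, tail slice); objective: simpler.


-- ===== PORT A =====
-- A: collect sample indices by unioning three ranges into a set, then sort and index.
def sample_viewer_rows_for_widths_py (rows : List (List String)) : List (List String) :=
  let total : Int := rows.length
  if total ≤ 220 then rows
  else
    let s1 : PySem.Set Int := PySem.Set.ofList (PySem.List.pyRange 0 (min 120 total) 1)
    let s2 : PySem.Set Int := PySem.Set.update s1 (PySem.List.pyRange (max 0 (total - 40)) total 1)
    let step : Int := max 1 (PySem.Int.floordiv total 80)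
    let s3 : PySem.Set Int := PySem.Set.update s2 (PySem.List.pyRange 0 total step)
    (PySem.List.sorted s3 (fun x => x)).map (fun index => PySem.List.pyGetD rows index [])

-- ===== PORT B =====
-- B: concatenate three segments directly — the head slice, the stepped middle from the first multiple of step ≥ 120, and the tail slice.
def sample_viewer_rows_for_widths_py_alt (rows : List (List String)) : List (List String) :=
  let total : Int := rows.length
  if total ≤ 220 then rows
  else
    let step : Int := max 1 (PySem.Int.floordiv total 80)
    let first : Int := (PySem.Int.floordiv 119 step + 1) * step
    let middle : List (List String) :=
      (PySem.List.pyRange first (total - 40) step).map (fun i => PySem.List.pyGetD rows i [])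
    PySem.List.slice rows none (some 120) ++ middle ++ PySem.List.slice rows (some (total - 40)) none

-- ===== PRECONDITION & SPEC =====
def Spec_sample_viewer_rows_for_widths_py (rows : List (List String)) (out : List (List String)) : Prop := out = sample_viewer_rows_for_widths_py_alt rows
instance (rows : List (List String)) (out : List (List String)) : Decidable (Spec_sample_viewer_rows_for_widths_py rows out) := by unfold Spec_sample_viewer_rows_for_widths_py; infer_instance

-- ===== CLAIM (what is proved, stated in full; the proofs are below) =====
def Claim_equal_sample_viewer_rows_for_widths_py : Prop := ∀ (rows : List (List String)), Dom_sample_viewer_rows_for_widths_py rows → Spec_sample_viewer_rows_for_widths_py rows (sample_viewer_rows_for_widths_py rows)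

-- ===== LEMMAS AND PROOFS =====

-- A pyRange with positive step is strictly increasing.
theorem pairwise_lt_pyRange_of_pos (a b st : Int) (h : 0 < st) :
    (PySem.List.pyRange a b st).Pairwise (· < ·) := by
  rw [PySem.List.pyRange_of_pos a b h]
  refine List.Pairwise.map _ (R := (· < ·)) ?_ List.pairwise_lt_range
  intro x y hxy
  have hx : (x:Int) < y := by exact_mod_cast hxy
  nlinarith

-- A's sorted union-set of indices is exactly B's three index segments in order.
theorem sorted_union_eq_segments (total : Int) (h : 220 < total) :
    PySem.List.sorted
      (PySem.Set.update
        (PySem.Set.update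
          (PySem.Set.ofList (PySem.List.pyRange 0 (min 120 total) 1))
          (PySem.List.pyRange (max 0 (total - 40)) total 1))
        (PySem.List.pyRange 0 total (max 1 (PySem.Int.floordiv total 80))))
      (fun x => x)
    = PySem.List.pyRange 0 120 1
      ++ PySem.List.pyRange ((PySem.Int.floordiv 119 (max 1 (PySem.Int.floordiv total 80)) + 1)
            * max 1 (PySem.Int.floordiv total 80)) (total - 40) (max 1 (PySem.Int.floordiv total 80))
      ++ PySem.List.pyRange (total - 40) total 1 := by
  set step : Int := max 1 (PySem.Int.floordiv total 80) with hstepdef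
  have hstep : (0:Int) < step := by
    have := le_max_left (1:Int) (PySem.Int.floordiv total 80); omega
  set first : Int := (PySem.Int.floordiv 119 step + 1) * step with hfirstdef
  have hdvd_first : step ∣ first := Dvd.intro_left _ rfl
  have hfirst120 : 120 ≤ first := by
    have hmul := PySem.Int.floordiv_mul_add_mod 119 step
    have hm0 := PySem.Int.mod_nonneg 119 hstep
    have hmlt := PySem.Int.mod_lt 119 hstep
    have : first = 119 - PySem.Int.mod 119 step + step := by rw [hfirstdef]; ring_nf; omega
    omega
  have hmin : min 120 total = 120 := by omega
  have hmax : max 0 (total - 40) = total - 40 := by omega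
  rw [hmin, hmax]
  have hpair_mid := pairwise_lt_pyRange_of_pos first (total - 40) step hstep
  apply PySem.List.sorted_eq_of_perm_of_pairwise_lt
  · -- permutation: both sides nodup with the same members
    have hnodup_rhs :
        (PySem.List.pyRange 0 120 1 ++ PySem.List.pyRange first (total - 40) step
          ++ PySem.List.pyRange (total - 40) total 1).Nodup := by
      refine (List.nodup_append).mpr ⟨(List.nodup_append).mpr
        ⟨PySem.List.nodup_pyRange_one 0 120, hpair_mid.imp ne_of_lt, ?_⟩,
        PySem.List.nodup_pyRange_one (total - 40) total, ?_⟩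
      · intro x hx y hy
        have hx' := (PySem.List.mem_pyRange_one).mp hx
        have hy' := ((PySem.List.mem_pyRange_iff_of_pos hstep y).mp hy).1
        omega
      · intro x hx y hy
        have hy' := (PySem.List.mem_pyRange_one).mp hy
        rcases (List.mem_append).mp hx with hx | hx
        · have hx' := (PySem.List.mem_pyRange_one).mp hx
          omega
        · have hx' := ((PySem.List.mem_pyRange_iff_of_pos hstep x).mp hx).2.1
          omega
    rw [List.perm_ext_iff_of_nodup hnodup_rhs
      (PySem.Set.nodup_update _ _ (PySem.Set.nodup_update _ _ (PySem.Set.nodup_ofList _)))]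
    intro a
    simp only [List.mem_append, PySem.Set.mem_update, PySem.Set.mem_ofList,
      PySem.List.mem_pyRange_one, PySem.List.mem_pyRange_iff_of_pos hstep, sub_zero]
    constructor
    · rintro ((⟨h0, h1⟩ | ⟨h0, h1, hd⟩) | ⟨h0, h1⟩)
      · exact Or.inl (Or.inl ⟨h0, by omega⟩)
      · refine Or.inr ⟨by omega, by omega, ?_⟩
        simpa using dvd_add hd hdvd_first
      · exact Or.inl (Or.inr ⟨by omega, h1⟩)
    · rintro ((⟨h0, h1⟩ | ⟨h0, h1⟩) | ⟨h0, h1, hd⟩)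
      · exact Or.inl (Or.inl ⟨h0, by omega⟩)
      · exact Or.inr ⟨by omega, h1⟩
      · -- a multiple of step inside [0, total): place it in the right segment
        by_cases hlt : a < 120
        · exact Or.inl (Or.inl ⟨h0, hlt⟩)
        · by_cases hge : total - 40 ≤ a
          · exact Or.inr ⟨hge, h1⟩
          · refine Or.inl (Or.inr ⟨?_, by omega, dvd_sub hd hdvd_first⟩)
            -- a = c * step with c*step ≥ 120 > 119 forces c ≥ 119//step + 1, so a ≥ first
            obtain ⟨c, hc⟩ := hd
            have h119 : (119:Int) < c * step := by rw [mul_comm, ← hc]; omega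
            have hcle := (PySem.Int.floordiv_lt_iff_lt_mul hstep).mpr h119
            calc first = (PySem.Int.floordiv 119 step + 1) * step := rfl
              _ ≤ c * step := by nlinarith
              _ = a := by rw [mul_comm, ← hc]
  · -- strictly increasing
    refine (List.pairwise_append).mpr ⟨(List.pairwise_append).mpr
      ⟨PySem.List.pairwise_lt_pyRange_one 0 120, hpair_mid, ?_⟩,
      PySem.List.pairwise_lt_pyRange_one (total - 40) total, ?_⟩
    · intro x hx y hy
      have hx' := (PySem.List.mem_pyRange_one).mp hx
      have hy' := ((PySem.List.mem_pyRange_iff_of_pos hstep y).mp hy).1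
      omega
    · intro x hx y hy
      have hy' := (PySem.List.mem_pyRange_one).mp hy
      rcases (List.mem_append).mp hx with hx | hx
      · have hx' := (PySem.List.mem_pyRange_one).mp hx
        omega
      · have hx' := ((PySem.List.mem_pyRange_iff_of_pos hstep x).mp hx).2.1
        omega

-- Mapping rows-lookup over the head segment is the head slice.
theorem map_pyGetD_head (rows : List (List String)) (h : (220:Int) < rows.length) :
    (PySem.List.pyRange 0 120 1).map (fun i => PySem.List.pyGetD rows i []) =
      PySem.List.slice rows none (some 120) := by
  have hsplit := PySem.List.pyRange_one_append 0 120 (rows.length : Int) (by omega) (by omega)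
  have hall := PySem.List.map_pyGetD_pyRange_zero' rows ([] : List String)
  rw [hsplit, List.map_append] at hall
  have hlen : ((PySem.List.pyRange 0 120 1).map (fun i => PySem.List.pyGetD rows i [])).length = 120 := by
    simp [PySem.List.length_pyRange_one]
  have := congrArg (fun l => l.take 120) hall
  simp only [← hlen, List.take_left] at this
  rw [this]
  rw [PySem.List.slice_to rows (by omega)]
  simp [hlen]

-- Mapping rows-lookup over the tail segment is the tail slice.
theorem map_pyGetD_tail (rows : List (List String)) (h : (220:Int) < rows.length) :
    (PySem.List.pyRange ((rows.length : Int) - 40) (rows.length : Int) 1).map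
        (fun i => PySem.List.pyGetD rows i []) =
      PySem.List.slice rows (some ((rows.length : Int) - 40)) none := by
  rw [PySem.List.slice_from rows (by omega)]
  exact PySem.List.map_pyGetD_pyRange' rows ([] : List String) (by omega)

-- ===== VERDICT (by name: the statement is the Claim_ definition above) =====
theorem sample_viewer_rows_for_widths_py_spec : Claim_equal_sample_viewer_rows_for_widths_py := by
  intro rows _
  unfold Spec_sample_viewer_rows_for_widths_py
  unfold sample_viewer_rows_for_widths_py sample_viewer_rows_for_widths_py_alt
  by_cases h : (rows.length : Int) ≤ 220
  · simp [h]
  · simp only [h, if_false]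
    rw [sorted_union_eq_segments _ (by omega), List.map_append, List.map_append,
      map_pyGetD_head rows (by omega), map_pyGetD_tail rows (by omega)]
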